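-- pv_equiv track=rewrite | github.com/erioluwabus-glitch/avap-support-bot | utils/db_async.py | _convert_sqlite_qmarks
-- ===== SOURCE A (Python) =====
-- from typing import Any, Iterable, List, Optional, Tuple, Dict
--
-- def _convert_sqlite_qmarks(query: str, params: Iterable[Any]) -> Tuple[str, Dict[str, Any]]:
--     """Convert '?' placeholders to named parameters :p0, :p1, ... for SQLAlchemy text()."""
--     if not isinstance(params, (list, tuple)):
--         # Assume mapping already
--         return query, params  # type: ignore
--     parts = query.split("?")
--     if len(parts) - 1 != len(params):
--         # Fallback: return original; execution may fail loudly for easier debugging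
--         return query, {f"p{i}": v for i, v in enumerate(params)}
--     new_query = []
--     for i, segment in enumerate(parts):
--         new_query.append(segment)
--         if i < len(params):
--             new_query.append(f":p{i}")
--     named = {f"p{i}": v for i, v in enumerate(params)}
--     return "".join(new_query), named
-- ===== SOURCE B (Python) =====
-- def _convert_sqlite_qmarks(query, params):
--     """Convert '?' placeholders to named :p0, :p1, ... in one left-to-right scan."""
--     if not isinstance(params, (list, tuple)):
--         return query, params
--     named = {f"p{i}": v for i, v in enumerate(params)}
--     if query.count("?") != len(params):
--         return query, named
--     out = []
--     i = 0
--     for ch in query: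
--         if ch == "?":
--             out.append(f":p{i}")
--             i += 1
--         else:
--             out.append(ch)
--     return "".join(out), named
-- ===== Notes on version B (the rewrite author's own statement) =====
-- stated objective: alternative
-- what changed: Replaces A's split-on-'?' / interleaved-rejoin construction by a single left-to-right character scan that emits ':pN' with an incrementing counter whenever it meets '?', after checking query.count('?') against len(params) directly.
import Mathlib
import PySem

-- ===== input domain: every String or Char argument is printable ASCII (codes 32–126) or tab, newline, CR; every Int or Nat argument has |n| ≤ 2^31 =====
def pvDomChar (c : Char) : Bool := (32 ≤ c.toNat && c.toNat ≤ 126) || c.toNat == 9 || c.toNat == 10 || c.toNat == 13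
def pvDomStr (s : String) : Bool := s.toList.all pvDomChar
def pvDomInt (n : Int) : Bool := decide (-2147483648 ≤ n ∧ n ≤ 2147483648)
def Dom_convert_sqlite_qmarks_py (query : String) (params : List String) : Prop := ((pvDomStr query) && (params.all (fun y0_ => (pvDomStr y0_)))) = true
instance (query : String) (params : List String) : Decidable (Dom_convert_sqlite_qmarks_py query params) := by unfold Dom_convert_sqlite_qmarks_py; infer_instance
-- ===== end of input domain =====

-- B scans the query once, emitting ':pN' per '?', instead of A's split/rejoin; return values proved equal (params is a list here, so A's mapping branch is vacuous).

-- ===== PORT A =====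
-- f"p{i}" / f":p{i}"
def pvPKey (i : Nat) : String := String.mk ('p' :: PySem.Int.toChars (i : Int))
def pvPRef (i : Nat) : List Char := ':' :: 'p' :: PySem.Int.toChars (i : Int)
-- named = {f"p{i}": v for i, v in enumerate(params)}
def pvNamed (params : List String) : List (String × String) :=
  (params.zipIdx.foldl (fun d vi => d.insert (pvPKey vi.2) vi.1) PySem.Dict.empty).items

def convert_sqlite_qmarks_py (query : String) (params : List String) : String × (List (String × String)) :=
  let parts := PySem.Chars.splitOn query.toList ['?']
  if (parts.length : Int) - 1 ≠ (params.length : Int) then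
    (query, pvNamed params)
  else
    let new_query := parts.zipIdx.foldl (fun acc si =>
      if si.2 < params.length then acc ++ [si.1] ++ [pvPRef si.2] else acc ++ [si.1])
      ([] : List (List Char))
    (String.mk (PySem.Chars.join [] new_query), pvNamed params)

-- ===== PORT B =====
def convert_sqlite_qmarks_py_alt (query : String) (params : List String) : String × (List (String × String)) :=
  let named := pvNamed params
  if PySem.Str.count query "?" ≠ params.length then
    (query, named)
  else
    let st := query.toList.foldl (fun (st : List (List Char) × Nat) ch =>
      if ch = '?' then (st.1 ++ [pvPRef st.2], st.2 + 1) else (st.1 ++ [[ch]], st.2))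
      (([] : List (List Char)), 0)
    (String.mk (PySem.Chars.join [] st.1), named)

-- ===== PRECONDITION & SPEC =====
def Spec_convert_sqlite_qmarks_py (query : String) (params : List String) (out : String × (List (String × String))) : Prop := out = convert_sqlite_qmarks_py_alt query params
instance (query : String) (params : List String) (out : String × (List (String × String))) : Decidable (Spec_convert_sqlite_qmarks_py query params out) := by unfold Spec_convert_sqlite_qmarks_py; infer_instance

-- ===== CLAIM (what is proved, stated in full; the proofs are below) =====
def Claim_equal_convert_sqlite_qmarks_py : Prop := ∀ (query : String) (params : List String), Dom_convert_sqlite_qmarks_py query params → Spec_convert_sqlite_qmarks_py query params (convert_sqlite_qmarks_py query params)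

-- ===== LEMMAS AND PROOFS =====

-- structural single-char split: mySplit cs = cs.split('?'), the parts A interleaves
def mySplit : List Char → List (List Char)
  | [] => [[]]
  | c :: t => if c = '?' then [] :: mySplit t else (mySplit t).modifyHead (c :: ·)

-- number of '?' in cs
def cntQ (cs : List Char) : Nat := cs.count '?'

lemma join_nil_flatten (l : List (List Char)) : PySem.Chars.join [] l = l.flatten := by
  show List.intercalate [] l = l.flatten
  induction l with
  | nil => rfl
  | cons a t ih =>
    cases t with
    | nil => simp [List.intercalate]
    | cons b u =>
      simp only [List.intercalate, List.intersperse] at *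
      simp_all [List.flatten]

lemma mySplit_ne_nil (cs : List Char) : mySplit cs ≠ [] := by
  cases cs with
  | nil => simp [mySplit]
  | cons c t =>
    simp only [mySplit]
    split
    · simp
    · cases h : mySplit t with
      | nil => exact absurd h (mySplit_ne_nil t)
      | cons a l => simp [List.modifyHead]

lemma length_mySplit (cs : List Char) : (mySplit cs).length = cntQ cs + 1 := by
  induction cs with
  | nil => simp [mySplit, cntQ]
  | cons c t ih =>
    simp only [mySplit, cntQ] at *
    by_cases h : c = '?'
    · simp [h, ih]
    · simp [h, ih]

lemma splitOn_go_spec (fuel : Nat) (l cur : List Char) (acc : List (List Char))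
    (h : l.length ≤ fuel) :
    PySem.Chars.splitOn.go ['?'] fuel l cur acc
      = acc.reverse ++ (mySplit l).modifyHead (cur.reverse ++ ·) := by
  induction fuel generalizing l cur acc with
  | zero =>
    have hl : l = [] := List.length_eq_zero_iff.mp (Nat.le_zero.mp h)
    subst hl
    simp [PySem.Chars.splitOn.go, mySplit, List.modifyHead]
  | succ fuel ih =>
    cases l with
    | nil => simp [PySem.Chars.splitOn.go, mySplit, List.modifyHead]
    | cons c rest =>
      simp only [PySem.Chars.splitOn.go]
      by_cases hc : c = '?'
      · subst hc
        have hpre : List.isPrefixOf ['?'] ('?' :: rest) = true := by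
          simp [List.isPrefixOf]
        simp only [hpre, if_pos]
        have hdrop : List.drop ['?'].length ('?' :: rest) = rest := rfl
        rw [hdrop, ih rest [] (List.reverse cur :: acc) (by simpa using Nat.le_of_succ_le_succ h)]
        cases hms : mySplit rest with
        | nil => exact absurd hms (mySplit_ne_nil rest)
        | cons a l => simp [mySplit, hms, List.modifyHead]
      · have hpre : List.isPrefixOf ['?'] (c :: rest) = false := by
          simp [List.isPrefixOf]
          exact fun hq => hc hq.symm
        simp only [hpre, Bool.false_eq_true, if_neg, not_false_iff]
        rw [ih rest (c :: cur) acc (by simpa using Nat.le_of_succ_le_succ h)]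
        have hms' : (mySplit (c :: rest)) = (mySplit rest).modifyHead (c :: ·) := by
          simp [mySplit, hc]
        rw [hms']
        cases hms : mySplit rest with
        | nil => exact absurd hms (mySplit_ne_nil rest)
        | cons a l => simp [List.modifyHead]

lemma splitOn_eq_mySplit (cs : List Char) :
    PySem.Chars.splitOn cs ['?'] = mySplit cs := by
  show PySem.Chars.splitOn.go ['?'] (cs.length + 1) cs [] [] = mySplit cs
  rw [splitOn_go_spec _ _ _ _ (by omega)]
  cases h : mySplit cs with
  | nil => exact absurd h (mySplit_ne_nil cs)
  | cons a l => simp [List.modifyHead]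

lemma count_go_spec (fuel : Nat) (l : List Char) (acc : Nat) (h : l.length ≤ fuel) :
    PySem.Chars.count.go ['?'] fuel l acc = acc + cntQ l := by
  induction fuel generalizing l acc with
  | zero =>
    have hl : l = [] := List.length_eq_zero_iff.mp (Nat.le_zero.mp h)
    subst hl; simp [PySem.Chars.count.go, cntQ]
  | succ fuel ih =>
    cases l with
    | nil => simp [PySem.Chars.count.go, cntQ]
    | cons c rest =>
      simp only [PySem.Chars.count.go]
      by_cases hc : c = '?'
      · subst hc
        have hpre : List.isPrefixOf ['?'] ('?' :: rest) = true := by simp [List.isPrefixOf]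
        simp only [hpre, if_pos]
        have hdrop : List.drop ['?'].length ('?' :: rest) = rest := rfl
        rw [hdrop, ih rest (acc + 1) (by simpa using Nat.le_of_succ_le_succ h)]
        simp [cntQ, List.count_cons]
        omega
      · have hpre : List.isPrefixOf ['?'] (c :: rest) = false := by
          simp [List.isPrefixOf]
          exact fun hq => hc hq.symm
        simp only [hpre, Bool.false_eq_true, if_neg, not_false_iff]
        rw [ih rest acc (by simpa using Nat.le_of_succ_le_succ h)]
        simp [cntQ, hc]

lemma count_eq_cntQ (cs : List Char) : PySem.Chars.count cs ['?'] = cntQ cs := by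
  show (if (['?'] : List Char).isEmpty = true then cs.length + 1 else PySem.Chars.count.go ['?'] cs.length cs 0) = cntQ cs
  simp only [List.isEmpty_cons, Bool.false_eq_true, if_neg, not_false_iff]
  rw [count_go_spec _ _ _ (le_refl _)]
  omega

-- the interleaved result B computes, structurally
def scanB : List Char → Nat → List Char
  | [], _ => []
  | c :: t, i => if c = '?' then pvPRef i ++ scanB t (i + 1) else c :: scanB t i

-- the flattened result of A's loop over the remaining parts, starting at part index i with n params
def aJoin : List (List Char) → Nat → Nat → List Char
  | [], _, _ => []
  | s :: ps, i, n => s ++ (if i < n then pvPRef i else []) ++ aJoin ps (i + 1) n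

lemma foldl_A_flatten (parts : List (List Char)) (k n : Nat) (acc : List (List Char)) :
    PySem.Chars.join [] ((parts.zipIdx k).foldl (fun acc si =>
        if si.2 < n then acc ++ [si.1] ++ [pvPRef si.2] else acc ++ [si.1]) acc)
      = PySem.Chars.join [] acc ++ aJoin parts k n := by
  induction parts generalizing k acc with
  | nil => simp [aJoin]
  | cons s ps ih =>
    simp only [List.zipIdx_cons, List.foldl_cons, aJoin]
    by_cases h : k < n
    · simp only [h, if_pos]
      rw [ih]
      simp [join_nil_flatten]
    · simp only [h, if_neg, not_false_iff]
      rw [ih]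
      simp [join_nil_flatten]

lemma aJoin_mySplit (cs : List Char) (i : Nat) :
    aJoin (mySplit cs) i (i + cntQ cs) = scanB cs i := by
  induction cs generalizing i with
  | nil => simp [mySplit, cntQ, aJoin, scanB]
  | cons c t ih =>
    by_cases hc : c = '?'
    · subst hc
      have hcnt : cntQ ('?' :: t) = cntQ t + 1 := by simp [cntQ]
      have hm : mySplit ('?' :: t) = [] :: mySplit t := by simp [mySplit]
      have hs : scanB ('?' :: t) i = pvPRef i ++ scanB t (i + 1) := by simp [scanB]
      have hlt : i < i + (cntQ t + 1) := by omega
      have harith : i + (cntQ t + 1) = (i + 1) + cntQ t := by omega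
      rw [hcnt, hm, hs]
      simp only [aJoin]
      rw [if_pos hlt, harith, ih]
      simp
    · have hcnt : cntQ (c :: t) = cntQ t := by simp [cntQ, hc]
      simp only [mySplit, hc, if_neg, not_false_iff, hcnt, scanB]
      cases hms : mySplit t with
      | nil => exact absurd hms (mySplit_ne_nil t)
      | cons a l =>
        simp only [List.modifyHead, aJoin]
        have hih := ih i
        rw [hms] at hih
        simp only [aJoin] at hih
        simp [← hih]

lemma foldl_B_flatten (cs : List Char) (i : Nat) (acc : List (List Char)) :
    PySem.Chars.join [] ((cs.foldl (fun (st : List (List Char) × Nat) ch =>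
        if ch = '?' then (st.1 ++ [pvPRef st.2], st.2 + 1) else (st.1 ++ [[ch]], st.2))
        (acc, i)).1)
      = PySem.Chars.join [] acc ++ scanB cs i := by
  induction cs generalizing i acc with
  | nil => simp [scanB]
  | cons c t ih =>
    simp only [List.foldl_cons]
    by_cases hc : c = '?'
    · subst hc
      simp only [scanB]
      rw [ih]
      simp [join_nil_flatten]
    · simp only [hc, if_neg, not_false_iff, scanB]
      rw [ih]
      simp [join_nil_flatten]

-- ===== VERDICT (by name: the statement is the Claim_ definition above) =====
theorem convert_sqlite_qmarks_py_spec : Claim_equal_convert_sqlite_qmarks_py := by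
  intro query params _
  unfold Spec_convert_sqlite_qmarks_py convert_sqlite_qmarks_py convert_sqlite_qmarks_py_alt
  have hsplit := splitOn_eq_mySplit query.toList
  have hcount : PySem.Str.count query "?" = cntQ query.toList := by
    simpa using count_eq_cntQ query.toList
  have hlen : (mySplit query.toList).length = cntQ query.toList + 1 := length_mySplit _
  simp only [hsplit, hcount, hlen]
  by_cases hmatch : cntQ query.toList = params.length
  · have h1 : ¬ (((cntQ query.toList + 1 : Nat) : Int) - 1 ≠ (params.length : Int)) := by
      push_cast
      omega
    have h2 : ¬ (cntQ query.toList ≠ params.length) := by omega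
    rw [if_neg h1, if_neg h2]
    refine Prod.ext ?_ rfl
    show String.mk _ = String.mk _
    have hA := foldl_A_flatten (mySplit query.toList) 0 params.length []
    have hB := foldl_B_flatten query.toList 0 []
    have hAJ : aJoin (mySplit query.toList) 0 (0 + cntQ query.toList) = scanB query.toList 0 :=
      aJoin_mySplit _ 0
    rw [Nat.zero_add, hmatch] at hAJ
    rw [hA, hB, hAJ]
  · have h1 : (((cntQ query.toList + 1 : Nat) : Int) - 1 ≠ (params.length : Int)) := by
      push_cast
      omega
    rw [if_pos h1, if_pos hmatch]
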